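-- pv_equiv track=rewrite | github.com/katryo/leetcode | 648-replace-words/solution.py | replaceWords2
-- ===== SOURCE A (Python) =====
-- from collections import defaultdict
--
-- def replaceWords2(roots, sentence):
--     Trie = lambda: defaultdict(Trie)
--     trie = Trie()
--     END = True
--
--     for root in roots:
--         cur = trie
--         for char in root:
--             cur = cur[char]
--         cur[END] = root
--
--     def replace(word):
--         cur = trie
--         for letter in word:
--             if letter not in cur or END in cur: break
--             cur = cur[letter]
--         return cur.get(END, word)
--
--     return " ".join(map(replace, sentence.split()))
-- ===== SOURCE B (Python) =====
-- def replaceWords2(roots, sentence):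
--     root_set = set(roots)
--
--     def replace(word):
--         for i in range(len(word) + 1):
--             if word[:i] in root_set:
--                 return word[:i]
--         return word
--
--     return " ".join(replace(word) for word in sentence.split())
-- ===== Notes on version B (the rewrite author's own statement) =====
-- stated objective: idiomatic
-- what changed: Replaces the hand-rolled defaultdict trie (built and walked character by character) with a flat set of roots queried by enumerating each word's prefixes in ascending length.
import Mathlib
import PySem

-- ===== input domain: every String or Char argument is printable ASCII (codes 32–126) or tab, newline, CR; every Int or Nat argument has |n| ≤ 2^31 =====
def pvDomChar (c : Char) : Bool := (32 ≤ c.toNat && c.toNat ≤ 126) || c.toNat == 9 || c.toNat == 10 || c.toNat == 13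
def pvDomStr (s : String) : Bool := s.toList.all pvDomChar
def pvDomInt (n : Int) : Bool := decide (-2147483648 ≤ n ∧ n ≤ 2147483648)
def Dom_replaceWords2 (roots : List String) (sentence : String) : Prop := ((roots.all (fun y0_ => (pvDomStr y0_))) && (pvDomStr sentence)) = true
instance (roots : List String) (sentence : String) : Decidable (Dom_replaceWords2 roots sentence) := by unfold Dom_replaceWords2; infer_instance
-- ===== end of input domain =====

-- B replaces A's hand-rolled defaultdict trie with a flat set of roots queried by
-- enumerating each word's prefixes in ascending length (idiomatic, same result).


-- ===== PORT A =====
-- A's trie: a node holds the optional END entry (cur[END] = root) and its children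
-- (insertion-ordered, like defaultdict).  A mutual pair instead of a nested inductive.
mutual
inductive PyTrie : Type where
  | node : Option String → PyChildren → PyTrie
inductive PyChildren : Type where
  | nil : PyChildren
  | cons : Char → PyTrie → PyChildren → PyChildren
end

def PyChildren.find? : PyChildren → Char → Option PyTrie
  | .nil, _ => none
  | .cons c' t rest, c => if c' = c then some t else rest.find? c

def PyChildren.set : PyChildren → Char → PyTrie → PyChildren
  | .nil, c, t => .cons c t .nil
  | .cons c' t' rest, c, t => if c' = c then .cons c' t rest else .cons c' t' (rest.set c t)

-- 'cur = trie; for char in root: cur = cur[char]; cur[END] = root'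
def insertRoot : PyTrie → List Char → String → PyTrie
  | .node _ ch, [], r => .node (some r) ch
  | .node e ch, c :: cs, r =>
      .node e (ch.set c (insertRoot ((ch.find? c).getD (.node none .nil)) cs r))

-- 'for letter in word: if letter not in cur or END in cur: break; cur = cur[letter];
--  return cur.get(END, word)'
def walkA : PyTrie → List Char → String → String
  | .node e _, [], word => e.getD word
  | .node e ch, c :: cs, word =>
      match ch.find? c, e with
      | some t, none => walkA t cs word
      | _, _ => e.getD word

def buildTrie (roots : List String) : PyTrie :=
  roots.foldl (fun t r => insertRoot t r.toList r) (.node none .nil)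

def replaceWords2 (roots : List String) (sentence : String) : String :=
  let trie := buildTrie roots
  PySem.Str.join " " ((PySem.Str.split₀ sentence).map (fun w => walkA trie w.toList w))

-- ===== PORT B =====
-- 'for i in range(len(word)+1): if word[:i] in root_set: return word[:i]; return word'
-- ported as a recursion that grows the prefix 'pre' one character at a time.
def firstPrefix (rs : PySem.Set String) (pre suf : List Char) : String :=
  if PySem.Set.contains rs (String.ofList pre) then String.ofList pre
  else
    match suf with
    | [] => String.ofList pre
    | c :: rest => firstPrefix rs (pre ++ [c]) rest

def replaceWords2_alt (roots : List String) (sentence : String) : String :=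
  let rootSet := PySem.Set.ofList roots
  PySem.Str.join " " ((PySem.Str.split₀ sentence).map (fun w => firstPrefix rootSet [] w.toList))

-- ===== PRECONDITION & SPEC =====
def Spec_replaceWords2 (roots : List String) (sentence : String) (out : String) : Prop := out = replaceWords2_alt roots sentence
instance (roots : List String) (sentence : String) (out : String) : Decidable (Spec_replaceWords2 roots sentence out) := by unfold Spec_replaceWords2; infer_instance

-- ===== CLAIM (what is proved, stated in full; the proofs are below) =====
def Claim_equal_replaceWords2 : Prop := ∀ (roots : List String) (sentence : String), Dom_replaceWords2 roots sentence → Spec_replaceWords2 roots sentence (replaceWords2 roots sentence)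

-- ===== LEMMAS AND PROOFS =====

-- node lookup by path
def nodeAt? : PyTrie → List Char → Option PyTrie
  | t, [] => some t
  | .node _ ch, c :: p =>
      match ch.find? c with
      | none => none
      | some t => nodeAt? t p

def endAt (t : PyTrie) (p : List Char) : Option String :=
  match nodeAt? t p with
  | some (.node e _) => e
  | none => none

theorem find?_set_self : ∀ (ch : PyChildren) (c : Char) (t : PyTrie),
    (ch.set c t).find? c = some t
  | .nil, c, t => by simp [PyChildren.set, PyChildren.find?]
  | .cons c' t' rest, c, t => by
      by_cases h : c' = c <;>
        simp [PyChildren.set, PyChildren.find?, h, find?_set_self rest c t]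

theorem find?_set_ne : ∀ (ch : PyChildren) (c c' : Char) (t : PyTrie), c' ≠ c →
    (ch.set c t).find? c' = ch.find? c'
  | .nil, c, c', t, h => by simp [PyChildren.set, PyChildren.find?, Ne.symm h]
  | .cons c₀ t₀ rest, c, c', t, h => by
      by_cases h0 : c₀ = c
      · subst h0; simp [PyChildren.set, PyChildren.find?, Ne.symm h]
      · simp only [PyChildren.set, if_neg h0, PyChildren.find?]
        by_cases h1 : c₀ = c' <;> simp [h1, find?_set_ne rest c c' t h]

theorem nodeAt?_append (t : PyTrie) (p q : List Char) :
    nodeAt? t (p ++ q) = (nodeAt? t p).bind (fun u => nodeAt? u q) := by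
  induction p generalizing t with
  | nil => simp [nodeAt?]
  | cons c p ih =>
      cases t with
      | node e ch =>
          simp only [List.cons_append, nodeAt?]
          cases ch.find? c with
          | none => simp
          | some u => simpa using ih u

theorem endAt_nil (e : Option String) (ch : PyChildren) : endAt (.node e ch) [] = e := rfl

theorem endAt_cons (e : Option String) (ch : PyChildren) (c : Char) (p : List Char) :
    endAt (.node e ch) (c :: p)
      = match ch.find? c with | none => none | some u => endAt u p := by
  cases h : ch.find? c <;> simp [endAt, nodeAt?, h]

theorem endAt_empty (p : List Char) : endAt (.node none .nil) p = none := by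
  cases p <;> simp [endAt, nodeAt?, PyChildren.find?]

theorem endAt_insert (cs : List Char) (t : PyTrie) (r : String) (p : List Char) :
    endAt (insertRoot t cs r) p = if p = cs then some r else endAt t p := by
  induction cs generalizing t p with
  | nil =>
      cases t with
      | node e ch =>
          cases p with
          | nil => simp [insertRoot, endAt_nil]
          | cons c p' => simp [insertRoot, endAt_cons]
  | cons d cs' ih =>
      cases t with
      | node e ch =>
          cases p with
          | nil => simp [insertRoot, endAt_nil]
          | cons c p' =>
              by_cases hc : c = d
              · subst hc
                rw [insertRoot, endAt_cons]
                simp only [find?_set_self]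
                rw [ih]
                by_cases hp : p' = cs'
                · simp [hp]
                · have hne : (c :: p' : List Char) ≠ c :: cs' := by simp [hp]
                  rw [if_neg hp, if_neg hne, endAt_cons]
                  cases hch : ch.find? c with
                  | some u => simp
                  | none => simp [endAt_empty]
              · have hne : (c :: p' : List Char) ≠ d :: cs' := by simp [hc]
                rw [insertRoot, endAt_cons, if_neg hne, endAt_cons,
                  find?_set_ne ch d c _ hc]

theorem hasNode_nil (t : PyTrie) : (nodeAt? t []).isSome = true := by
  cases t <;> simp [nodeAt?]

theorem hasNode_cons (e : Option String) (ch : PyChildren) (c : Char) (p : List Char) :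
    (nodeAt? (.node e ch) (c :: p)).isSome
      = match ch.find? c with | none => false | some u => (nodeAt? u p).isSome := by
  cases h : ch.find? c <;> simp [nodeAt?, h]

theorem nodeAt?_insert_isSome (cs : List Char) (t : PyTrie) (r : String) (p : List Char) :
    (nodeAt? (insertRoot t cs r) p).isSome
      = ((nodeAt? t p).isSome || decide (p <+: cs)) := by
  induction cs generalizing t p with
  | nil =>
      cases t with
      | node e ch =>
          cases p with
          | nil => simp [insertRoot, hasNode_nil]
          | cons c p' => simp [insertRoot, hasNode_cons]
  | cons d cs' ih =>
      cases t with
      | node e ch =>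
          cases p with
          | nil => simp [insertRoot, hasNode_nil]
          | cons c p' =>
              by_cases hc : c = d
              · subst hc
                rw [insertRoot, hasNode_cons]
                simp only [find?_set_self]
                rw [ih, hasNode_cons]
                cases hch : ch.find? c with
                | some u => simp [List.cons_prefix_cons]
                | none =>
                    cases p' with
                    | nil => simp
                    | cons a b => simp [nodeAt?, PyChildren.find?, List.cons_prefix_cons]
              · have : ¬ (c :: p' <+: d :: cs') := by simp [List.cons_prefix_cons, hc]
                rw [insertRoot, hasNode_cons, find?_set_ne ch d c _ hc, hasNode_cons]
                simp [this]

theorem endAt_build_aux (roots : List String) (t : PyTrie) (p : List Char) :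
    endAt (roots.foldl (fun t r => insertRoot t r.toList r) t) p
      = if ∃ r ∈ roots, r.toList = p then some (String.ofList p) else endAt t p := by
  induction roots generalizing t with
  | nil => simp
  | cons r rs ih =>
      simp only [List.foldl_cons]
      rw [ih, endAt_insert]
      by_cases hrs : ∃ r' ∈ rs, r'.toList = p
      · have hcons : ∃ r' ∈ r :: rs, r'.toList = p :=
          ⟨hrs.choose, List.mem_cons_of_mem _ hrs.choose_spec.1, hrs.choose_spec.2⟩
        rw [if_pos hrs, if_pos hcons]
      · by_cases hp : p = r.toList
        · subst hp
          rw [if_neg hrs,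
            if_pos (show ∃ r' ∈ r :: rs, r'.toList = r.toList from ⟨r, by simp⟩)]
          simp
        · have hno : ¬ ∃ r' ∈ r :: rs, r'.toList = p := by
            rintro ⟨r', hr', he⟩
            rcases List.mem_cons.mp hr' with h | h
            · rw [h] at he; exact hp he.symm
            · exact hrs ⟨r', h, he⟩
          rw [if_neg hrs, if_neg hp, if_neg hno]

theorem endAt_build (roots : List String) (p : List Char) :
    endAt (buildTrie roots) p
      = if String.ofList p ∈ roots then some (String.ofList p) else none := by
  rw [buildTrie, endAt_build_aux]
  have : (∃ r ∈ roots, r.toList = p) ↔ String.ofList p ∈ roots := by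
    constructor
    · rintro ⟨r, hr, he⟩; have : r = String.ofList p := by rw [← he]; simp
      exact this ▸ hr
    · intro h; exact ⟨String.ofList p, h, by simp⟩
  rw [if_congr this rfl rfl, endAt_empty]

theorem nodeAt?_build_aux (roots : List String) (t : PyTrie) (p : List Char) :
    (nodeAt? (roots.foldl (fun t r => insertRoot t r.toList r) t) p).isSome
      = ((nodeAt? t p).isSome || roots.any (fun r => decide (p <+: r.toList))) := by
  induction roots generalizing t with
  | nil => simp
  | cons r rs ih =>
      simp only [List.foldl_cons, List.any_cons]
      rw [ih, nodeAt?_insert_isSome]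
      cases h : decide (p <+: r.toList) <;> simp [h] <;> tauto

theorem nodeAt?_build_none (roots : List String) (p : List Char)
    (h : nodeAt? (buildTrie roots) p = none) :
    ∀ r ∈ roots, ¬ p <+: r.toList := by
  intro r hr hpre
  have := nodeAt?_build_aux roots (.node none .nil) p
  rw [buildTrie] at h
  rw [h] at this
  simp only [Option.isSome_none, Bool.false_eq, Bool.or_eq_false_iff] at this
  have := this.2
  rw [List.any_eq_false] at this
  exact absurd (by simpa using hpre) (by simpa using this r hr)

-- if no prefix extending pre is a root, B returns the whole word
theorem firstPrefix_none (rs : PySem.Set String) (suf pre : List Char)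
    (h : ∀ ext : List Char, PySem.Set.contains rs (String.ofList (pre ++ ext)) = false) :
    firstPrefix rs pre suf = String.ofList (pre ++ suf) := by
  induction suf generalizing pre with
  | nil =>
      have := h []
      simp at this
      simp [firstPrefix, this]
  | cons c rest ih =>
      have h0 := h []
      simp at h0
      rw [firstPrefix, if_neg (by simp [h0])]
      rw [ih (pre ++ [c]) (fun ext => by simpa using h (c :: ext))]
      simp

-- membership in the ported set is plain list membership of the roots
theorem contains_ofList (roots : List String) (x : String) :
    PySem.Set.contains (PySem.Set.ofList roots) x = decide (x ∈ roots) := by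
  show List.contains (PySem.Set.ofList roots) x = decide (x ∈ roots)
  rw [Bool.eq_iff_iff]
  simp [PySem.Set.mem_ofList]

-- main correspondence between A's walk and B's prefix enumeration
theorem walk_eq_firstPrefix (roots : List String) (suf : List Char) :
    ∀ (pre : List Char) (t : PyTrie), nodeAt? (buildTrie roots) pre = some t →
      walkA t suf (String.ofList (pre ++ suf))
        = firstPrefix (PySem.Set.ofList roots) pre suf := by
  induction suf with
  | nil =>
      rintro pre ⟨e, ch⟩ ht
      have he : e = if String.ofList pre ∈ roots then some (String.ofList pre) else none := by
        have h2 := endAt_build roots pre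
        unfold endAt at h2
        rw [ht] at h2
        simpa using h2
      by_cases hmem : String.ofList pre ∈ roots <;>
        simp [walkA, firstPrefix, he, hmem]
  | cons c rest ih =>
      rintro pre ⟨e, ch⟩ ht
      have he : e = if String.ofList pre ∈ roots then some (String.ofList pre) else none := by
        have h2 := endAt_build roots pre
        unfold endAt at h2
        rw [ht] at h2
        simpa using h2
      by_cases hmem : String.ofList pre ∈ roots
      · cases hch : ch.find? c <;>
          simp [walkA, hch, he, hmem, firstPrefix]
      · rw [firstPrefix, if_neg (by simp [hmem])]
        have hnode : nodeAt? (buildTrie roots) (pre ++ [c])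
            = match ch.find? c with | none => none | some u => some u := by
          rw [nodeAt?_append, ht]
          cases h : ch.find? c <;> simp [nodeAt?, h]
        cases hch : ch.find? c with
        | none =>
            rw [hch] at hnode
            have hno := nodeAt?_build_none roots (pre ++ [c]) hnode
            rw [firstPrefix_none (PySem.Set.ofList roots) rest (pre ++ [c])
              (fun ext => by
                have hnm : String.ofList (pre ++ [c] ++ ext) ∉ roots := fun hmem' =>
                  hno _ hmem'
                    (by rw [show (String.ofList (pre ++ [c] ++ ext)).toList
                          = (pre ++ [c]) ++ ext by simp]
                        exact List.prefix_append _ _)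
                rw [contains_ofList, decide_eq_false hnm])]
            simp [walkA, hch, he, hmem]
        | some u =>
            rw [hch] at hnode
            rw [show String.ofList (pre ++ c :: rest)
              = String.ofList ((pre ++ [c]) ++ rest) by simp]
            rw [show walkA (PyTrie.node e ch) (c :: rest) (String.ofList ((pre ++ [c]) ++ rest))
              = walkA u rest (String.ofList ((pre ++ [c]) ++ rest)) by
                simp [walkA, hch, he, hmem]]
            exact ih (pre ++ [c]) u hnode

-- ===== VERDICT (by name: the statement is the Claim_ definition above) =====
theorem replaceWords2_spec : Claim_equal_replaceWords2 := by
  intro roots sentence _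
  unfold Spec_replaceWords2 replaceWords2 replaceWords2_alt
  simp only
  congr 1
  apply List.map_congr_left
  intro w _
  have := walk_eq_firstPrefix roots w.toList [] (buildTrie roots) (by simp [nodeAt?])
  simpa using this
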